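-- pv_equiv track=rewrite | github.com/LadaM/goit-t1-algodat | homeworks/hw_08/joining_cables.py | get_cost_connecting_cables_sorting
-- ===== SOURCE A (Python) =====
-- def get_cost_connecting_cables_sorting(cables):
--     if cables is None or len(cables) == 0:
--         return None, 0
--
--     if len(cables) == 1:
--         return cables[0], 0
--
--     sorted_cables = sorted(cables)
--     cost = 0
--     connected_cable = sorted_cables.pop(0)
--     while len(sorted_cables) > 0:
--         connected_cable += sorted_cables.pop(0)
--         cost += connected_cable
--
--     return connected_cable, cost
-- ===== SOURCE B (Python) =====
-- def get_cost_connecting_cables_sorting(cables):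
--     # Sort once, then a single prefix-sum pass; cost = sum of all prefix sums minus the first element.
--     if not cables:
--         return None, 0
--     s = sorted(cables)
--     prefix = 0
--     acc = 0
--     for c in s:
--         prefix += c
--         acc += prefix
--     return prefix, acc - s[0]
-- ===== Notes on version B (the rewrite author's own statement) =====
-- stated objective: faster
-- what changed: Replaces the while-loop that repeatedly pops the front of the sorted list (O(n) per pop) with one prefix-sum pass over the sorted list, computing the cost as the sum of all prefix sums minus the first element, with no special case for length 1.
import Mathlib
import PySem

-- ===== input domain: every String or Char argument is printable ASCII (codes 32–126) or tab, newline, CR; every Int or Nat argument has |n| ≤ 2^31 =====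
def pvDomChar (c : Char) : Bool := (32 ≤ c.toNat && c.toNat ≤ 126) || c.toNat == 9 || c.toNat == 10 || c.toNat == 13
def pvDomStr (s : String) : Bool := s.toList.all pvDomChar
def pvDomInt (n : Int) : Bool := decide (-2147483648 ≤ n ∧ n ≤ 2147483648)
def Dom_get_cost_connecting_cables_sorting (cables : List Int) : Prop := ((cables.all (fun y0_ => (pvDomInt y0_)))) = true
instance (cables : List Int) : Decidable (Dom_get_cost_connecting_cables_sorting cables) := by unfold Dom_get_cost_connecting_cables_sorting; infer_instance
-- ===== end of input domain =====

-- B replaces A's quadratic pop(0) while-loop by one prefix-sum pass over the sorted list (objective: faster, asymptotic).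

-- ===== PORT A =====
-- the while loop: connected_cable += pop(0); cost += connected_cable
def pvLoopA : Int → Int → List Int → Int × Int
  | conn, cost, [] => (conn, cost)
  | conn, cost, x :: xs => pvLoopA (conn + x) (cost + (conn + x)) xs

def get_cost_connecting_cables_sorting (cables : List Int) : Option Int × Int :=
  if cables.length = 0 then (none, 0)
  else if cables.length = 1 then (PySem.List.pyGet? cables 0, 0)
  else
    match PySem.List.sorted cables (fun x => x) false with
    | [] => (none, 0)  -- unreachable: sorted of a nonempty list is nonempty
    | h :: t =>
      let r := pvLoopA h 0 t  -- connected_cable = pop(0), then the while loop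
      (some r.1, r.2)

-- ===== PORT B =====
def get_cost_connecting_cables_sorting_alt (cables : List Int) : Option Int × Int :=
  if cables.isEmpty then (none, 0)
  else
    let s := PySem.List.sorted cables (fun x => x) false
    let pa := s.foldl (fun (pa : Int × Int) c => (pa.1 + c, pa.2 + (pa.1 + c))) (0, 0)
    (some pa.1, pa.2 - s.headI)  -- s is nonempty here, so s.headI = s[0] exactly

-- ===== PRECONDITION & SPEC =====
def Spec_get_cost_connecting_cables_sorting (cables : List Int) (out : Option Int × Int) : Prop := out = get_cost_connecting_cables_sorting_alt cables
instance (cables : List Int) (out : Option Int × Int) : Decidable (Spec_get_cost_connecting_cables_sorting cables out) := by unfold Spec_get_cost_connecting_cables_sorting; infer_instance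

-- ===== CLAIM (what is proved, stated in full; the proofs are below) =====
def Claim_equal_get_cost_connecting_cables_sorting : Prop := ∀ (cables : List Int), Dom_get_cost_connecting_cables_sorting cables → Spec_get_cost_connecting_cables_sorting cables (get_cost_connecting_cables_sorting cables)

-- ===== LEMMAS AND PROOFS =====

-- A's loop is B's fold from the same state
theorem pvLoopA_eq_foldl (t : List Int) : ∀ (conn cost : Int),
    pvLoopA conn cost t = t.foldl (fun (pa : Int × Int) c => (pa.1 + c, pa.2 + (pa.1 + c))) (conn, cost) := by
  induction t with
  | nil => intro conn cost; rfl
  | cons x xs ih => intro conn cost; simp [pvLoopA, List.foldl, ih]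

-- shifting the accumulator of B's fold shifts the second component
theorem pvFold_shift (t : List Int) : ∀ (conn cost d : Int),
    t.foldl (fun (pa : Int × Int) c => (pa.1 + c, pa.2 + (pa.1 + c))) (conn, cost + d)
      = ((t.foldl (fun (pa : Int × Int) c => (pa.1 + c, pa.2 + (pa.1 + c))) (conn, cost)).1,
         (t.foldl (fun (pa : Int × Int) c => (pa.1 + c, pa.2 + (pa.1 + c))) (conn, cost)).2 + d) := by
  induction t with
  | nil => intro conn cost d; rfl
  | cons x xs ih =>
    intro conn cost d
    simp only [List.foldl]
    rw [show cost + d + (conn + x) = (cost + (conn + x)) + d by ring, ih]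

theorem pv_main (cables : List Int) :
    get_cost_connecting_cables_sorting cables = get_cost_connecting_cables_sorting_alt cables := by
  unfold get_cost_connecting_cables_sorting get_cost_connecting_cables_sorting_alt
  match hc : cables with
  | [] => rfl
  | [x] =>
    simp [PySem.List.pyGet?, PySem.List.pyIdx?,
      PySem.List.sorted_eq_of_perm_of_pairwise_lt (xs := [x]) (ys := [x]) (key := fun y => y)
        (List.Perm.refl _) (by simp)]
  | a :: b :: rest =>
    have hne : PySem.List.sorted (a :: b :: rest) (fun x => x) false ≠ [] := by
      intro h
      have hp := PySem.List.sorted_perm (xs := a :: b :: rest) (key := fun x => x) (rev := false)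
      rw [h] at hp
      exact absurd hp.length_eq (by simp)
    match hs : PySem.List.sorted (a :: b :: rest) (fun x => x) false with
    | [] => exact absurd hs hne
    | h :: t =>
      rw [if_neg (by simp), if_neg (by simp), if_neg (by simp)]
      simp only [List.foldl, List.headI, zero_add]
      rw [pvLoopA_eq_foldl]
      have hsh := pvFold_shift t h 0 h
      simp only [zero_add] at hsh
      rw [hsh]
      simp

-- ===== VERDICT (by name: the statement is the Claim_ definition above) =====
theorem get_cost_connecting_cables_sorting_spec : Claim_equal_get_cost_connecting_cables_sorting := by
  intro cables _
  unfold Spec_get_cost_connecting_cables_sorting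
  exact pv_main cables
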